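-- pv_equiv track=rewrite | github.com/roshan-research/hazm | hazm/ner.py | convert_to_spacy_format
-- ===== SOURCE A (Python) =====
-- def convert_to_spacy_format(data):
--     """
--     Convert data from CoNNL-like format to SpaCy format.
--
--     Args:
--     - data (List[Tuple[str, str]]): List of tuples containing token-label pairs.
--
--     Returns:
--     - Tuple[str, List[Tuple[int, int, str]]]: A tuple containing the processed text and entity annotations.
--     """
--     # Initialize variables to store text and entities
--     text = ''
--     entities = []
--
--     # Iterate through each token-label pair
--     for word, label in data:
--         # If the label is 'O', append the word to the text
--         if label == 'O':
--             text += ' ' + word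
--         else:
--             # If the label indicates an entity, update text and entities accordingly
--             text += ' ' + word
--             if text:
--                 entities.append((len(text) - len(word) - 1, len(text) - 1, label))
--             else:
--                 entities.append((0, len(word) - 1, label))
--
--     # Merge adjacent entities with the same label
--     if text:
--         return text.strip(), merge_tags(entities)
--     else:
--         return text, []
--
-- def merge_tags(tags):
--     """
--     Merge adjacent entities with the same label.
--
--     Args:
--     - tags (List[Tuple[int, int, str]]): List of entity annotations.
--
--     Returns:
--     - List[Tuple[int, int, str]]: List of merged entity annotations.
--     """
--     merged_tags = []
--     current_tag = None
--     start = None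
--     end = None
--
--     for i, (start_idx, end_idx, tag) in enumerate(tags):
--         if tag.startswith('B-'):
--             if current_tag is not None:
--                 merged_tags.append((start, end, current_tag))
--             current_tag = tag[2:]
--             start = start_idx
--             end = end_idx
--         elif tag.startswith('I-'):
--             if current_tag is not None and tag[2:] == current_tag:
--                 end = end_idx
--         else:  # tag == 'O'
--             if current_tag is not None:
--                 merged_tags.append((start, end, current_tag))
--                 current_tag = None
--
--     if current_tag is not None:
--         merged_tags.append((start, end, current_tag))
--
--     return merged_tags
-- ===== SOURCE B (Python) =====
-- def convert_to_spacy_format(data):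
--     """Single streaming pass: track a running character offset and merge
--     B-/I- runs with an inline state machine instead of building an
--     intermediate entity list and calling merge_tags afterwards."""
--     words = []
--     spans = []
--     cur = None          # open entity: (start, end, tag) or None
--     pos = 0             # length of the (unstripped) text built so far
--     for word, label in data:
--         words.append(word)
--         start, end = pos, pos + len(word)   # offsets in the unstripped text
--         pos += 1 + len(word)
--         if label != 'O':
--             if label.startswith('B-'):
--                 if cur is not None:
--                     spans.append(cur)
--                 cur = (start, end, label[2:])
--             elif label.startswith('I-'):
--                 if cur is not None and label[2:] == cur[2]:
--                     cur = (cur[0], end, cur[2])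
--             else:
--                 if cur is not None:
--                     spans.append(cur)
--                     cur = None
--     if cur is not None:
--         spans.append(cur)
--     return ' '.join(words).strip(), spans
-- ===== Notes on version B (the rewrite author's own statement) =====
-- stated objective: alternative
-- what changed: One streaming pass with a running character offset and an inline B-/I- merge state machine replaces A's two passes (build text+entity list, then merge_tags); text is built as ' '.join(words).strip() instead of repeated string concatenation.
import Mathlib
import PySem

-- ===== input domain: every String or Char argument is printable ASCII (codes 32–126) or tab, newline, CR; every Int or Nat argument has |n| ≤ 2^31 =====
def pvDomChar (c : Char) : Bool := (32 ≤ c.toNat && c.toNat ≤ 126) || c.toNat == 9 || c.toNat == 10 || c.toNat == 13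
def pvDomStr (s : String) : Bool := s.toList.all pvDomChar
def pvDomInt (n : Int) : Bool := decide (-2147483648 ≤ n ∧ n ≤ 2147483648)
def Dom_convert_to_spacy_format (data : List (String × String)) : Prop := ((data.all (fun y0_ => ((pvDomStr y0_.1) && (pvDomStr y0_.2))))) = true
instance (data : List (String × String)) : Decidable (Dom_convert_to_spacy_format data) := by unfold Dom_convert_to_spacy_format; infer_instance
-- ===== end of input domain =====

-- B is an ALTERNATIVE decomposition: one streaming pass with a running offset and an
-- inline B-/I- merge state machine, instead of A's text+entity pass followed by merge_tags.

-- ===== PORT A =====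
-- loop body of merge_tags (state: merged list, current tag, start, end)
def pvMStep (st : List (Int × Int × String) × Option String × Int × Int)
    (t : Int × Int × String) : List (Int × Int × String) × Option String × Int × Int :=
  if PySem.Str.startswith t.2.2 "B-" then
    ((match st.2.1 with
      | some c => st.1 ++ [(st.2.2.1, st.2.2.2, c)]
      | none => st.1),
     some (PySem.Str.slice t.2.2 (some 2) none), t.1, t.2.1)
  else if PySem.Str.startswith t.2.2 "I-" then
    (match st.2.1 with
     | some c =>
       if PySem.Str.slice t.2.2 (some 2) none == c then (st.1, some c, st.2.2.1, t.2.1) else st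
     | none => st)
  else
    (match st.2.1 with
     | some c => (st.1 ++ [(st.2.2.1, st.2.2.2, c)], none, st.2.2.1, st.2.2.2)
     | none => st)

def merge_tags (tags : List (Int × Int × String)) : List (Int × Int × String) :=
  let st := tags.foldl pvMStep ([], none, 0, 0)
  match st.2.1 with
  | some c => st.1 ++ [(st.2.2.1, st.2.2.2, c)]
  | none => st.1

-- loop body of A (state: text as its character list, entities); string ops on List Char as PySem defines them
def pvAStep (st : List Char × List (Int × Int × String)) (wl : String × String) :
    List Char × List (Int × Int × String) :=
  if wl.2 == "O" then (st.1 ++ ' ' :: wl.1.toList, st.2)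
  else
    let text' := st.1 ++ ' ' :: wl.1.toList
    if text' ≠ [] then
      (text', st.2 ++ [((text'.length : Int) - (wl.1.toList.length : Int) - 1, (text'.length : Int) - 1, wl.2)])
    else
      (text', st.2 ++ [(0, (wl.1.toList.length : Int) - 1, wl.2)])

def convert_to_spacy_format (data : List (String × String)) : String × (List (Int × Int × String)) :=
  let st := data.foldl pvAStep ([], [])
  if st.1 ≠ [] then (String.ofList (PySem.Chars.strip st.1), merge_tags st.2)
  else (String.ofList st.1, [])

-- ===== PORT B =====
-- loop body of B (state: words, finished spans, open span, running offset)
def pvBStep (st : List String × List (Int × Int × String) × Option (Int × Int × String) × Int)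
    (wl : String × String) :
    List String × List (Int × Int × String) × Option (Int × Int × String) × Int :=
  let words' := st.1 ++ [wl.1]
  let start := st.2.2.2
  let stop := st.2.2.2 + (wl.1.toList.length : Int)
  let pos' := st.2.2.2 + 1 + (wl.1.toList.length : Int)
  if wl.2 == "O" then (words', st.2.1, st.2.2.1, pos')
  else if PySem.Str.startswith wl.2 "B-" then
    (words',
     (match st.2.2.1 with | some c => st.2.1 ++ [c] | none => st.2.1),
     some (start, stop, PySem.Str.slice wl.2 (some 2) none), pos')
  else if PySem.Str.startswith wl.2 "I-" then
    (match st.2.2.1 with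
     | some c =>
       if PySem.Str.slice wl.2 (some 2) none == c.2.2 then
         (words', st.2.1, some (c.1, stop, c.2.2), pos')
       else (words', st.2.1, st.2.2.1, pos')
     | none => (words', st.2.1, st.2.2.1, pos'))
  else
    (match st.2.2.1 with
     | some c => (words', st.2.1 ++ [c], none, pos')
     | none => (words', st.2.1, st.2.2.1, pos'))

def convert_to_spacy_format_alt (data : List (String × String)) : String × (List (Int × Int × String)) :=
  let st := data.foldl pvBStep ([], [], none, 0)
  (PySem.Str.strip (PySem.Str.join " " st.1),
   match st.2.2.1 with | some c => st.2.1 ++ [c] | none => st.2.1)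

-- ===== PRECONDITION & SPEC =====
def Spec_convert_to_spacy_format (data : List (String × String)) (out : String × (List (Int × Int × String))) : Prop := out = convert_to_spacy_format_alt data
instance (data : List (String × String)) (out : String × (List (Int × Int × String))) : Decidable (Spec_convert_to_spacy_format data out) := by unfold Spec_convert_to_spacy_format; infer_instance

-- ===== CLAIM (what is proved, stated in full; the proofs are below) =====
def Claim_equal_convert_to_spacy_format : Prop := ∀ (data : List (String × String)), Dom_convert_to_spacy_format data → Spec_convert_to_spacy_format data (convert_to_spacy_format data)

-- ===== LEMMAS AND PROOFS =====

-- ' ' + w1 + ' ' + w2 + … : the text A accumulates, as a function of the word list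
def pvJoinSp (ws : List String) : List Char :=
  (ws.map (fun w => ' ' :: w.toList)).flatten

-- flush of the open span at the end of B / of the merge state at the end of merge_tags
def pvFlush (spans : List (Int × Int × String)) (cur : Option (Int × Int × String)) :
    List (Int × Int × String) :=
  match cur with | some c => spans ++ [c] | none => spans

lemma pvAStep_snd (text : List Char) (es : List (Int × Int × String)) (wl : String × String) :
    pvAStep (text, es) wl =
      ((pvAStep (text, []) wl).1, es ++ (pvAStep (text, []) wl).2) := by
  simp only [pvAStep]
  split_ifs <;> simp

lemma pvAFold_snd (data : List (String × String)) (text : List Char)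
    (es : List (Int × Int × String)) :
    data.foldl pvAStep (text, es) =
      ((data.foldl pvAStep (text, []) ).1, es ++ (data.foldl pvAStep (text, []) ).2) := by
  induction data generalizing text es with
  | nil => simp
  | cons wl rest ih =>
    simp only [List.foldl_cons]
    rw [pvAStep_snd, ih, ih (pvAStep (text, []) wl).1 (pvAStep (text, []) wl).2]
    simp

lemma pvBFold_words (data : List (String × String)) (st : List String × List (Int × Int × String) × Option (Int × Int × String) × Int) :
    (data.foldl pvBStep st).1 = st.1 ++ data.map Prod.fst := by
  induction data generalizing st with
  | nil => simp
  | cons wl rest ih =>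
    simp only [List.foldl_cons, List.map_cons, ih]
    have : (pvBStep st wl).1 = st.1 ++ [wl.1] := by
      simp only [pvBStep]
      split_ifs <;> cases h : st.2.2.1 <;> (first | rfl | (dsimp only; (first | rfl | (split_ifs <;> rfl))))
    rw [this]; simp

-- current open span of a merge state, in B's representation
def pvMCur (ms : List (Int × Int × String) × Option String × Int × Int) :
    Option (Int × Int × String) :=
  ms.2.1.map (fun c => (ms.2.2.1, ms.2.2.2, c))

-- one step: A's entity delta pushed through the merge machine matches B's step
lemma pvStep_corr (text : List Char) (ws : List String) (wl : String × String)
    (spans : List (Int × Int × String)) (curTag : Option String) (s e : Int) :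
    pvBStep (ws, spans, curTag.map (fun c => (s, e, c)), (text.length : Int)) wl =
      (ws ++ [wl.1],
       ((pvAStep (text, []) wl).2.foldl pvMStep (spans, curTag, s, e)).1,
       pvMCur ((pvAStep (text, []) wl).2.foldl pvMStep (spans, curTag, s, e)),
       ((pvAStep (text, []) wl).1.length : Int)) := by
  simp only [pvAStep, pvBStep]
  split_ifs with h1 h2 h3 <;>
    cases curTag <;>
      simp_all [pvMStep, pvMCur, Prod.ext_iff, List.length_append] <;>
        first
          | omega
          | rfl
          | (split_ifs <;> simp_all [Prod.ext_iff] <;> try omega)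

-- Main invariant: A's fold pushed through the merge machine agrees with B's fold.
lemma pvMain (data : List (String × String)) (text : List Char) (ws : List String)
    (spans : List (Int × Int × String)) (curTag : Option String) (s e : Int) :
    pvFlush (((data.foldl pvAStep (text, [])).2.foldl pvMStep (spans, curTag, s, e)).1)
        (pvMCur ((data.foldl pvAStep (text, [])).2.foldl pvMStep (spans, curTag, s, e))) =
      pvFlush ((data.foldl pvBStep (ws, spans, curTag.map (fun c => (s, e, c)), (text.length : Int))).2.1)
              ((data.foldl pvBStep (ws, spans, curTag.map (fun c => (s, e, c)), (text.length : Int))).2.2.1) := by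
  induction data generalizing text ws spans curTag s e with
  | nil => cases curTag <;> rfl
  | cons wl rest ih =>
    simp only [List.foldl_cons]
    rw [pvAFold_snd, List.foldl_append, pvStep_corr]
    have hms : ∀ (ms : List (Int × Int × String) × Option String × Int × Int),
        pvMCur ms = ms.2.1.map (fun c => (ms.2.2.1, ms.2.2.2, c)) := fun _ => rfl
    rw [hms]
    exact ih (pvAStep (text, []) wl).1 (ws ++ [wl.1]) _ _ _ _

-- A's accumulated text is pvJoinSp of the words, for the initial state
lemma pvAFold_text (data : List (String × String)) (text : List Char) :
    (data.foldl pvAStep (text, [])).1 = text ++ pvJoinSp (data.map Prod.fst) := by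
  induction data generalizing text with
  | nil => simp [pvJoinSp]
  | cons wl rest ih =>
    simp only [List.foldl_cons]
    rw [pvAStep_snd, pvAFold_snd]
    have h1 : (pvAStep (text, []) wl).1 = text ++ ' ' :: wl.1.toList := by
      simp only [pvAStep]; split_ifs <;> simp_all
    simp only [h1] at *
    rw [ih]
    simp [pvJoinSp]

lemma pvStrip_space_cons (l : List Char) :
    PySem.Chars.strip (' ' :: l) = PySem.Chars.strip l := by
  simp [PySem.Chars.strip, PySem.Chars.lstrip, PySem.Chars.isspace]

lemma pvJoinSp_cons_join (w : String) (ws : List String) :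
    pvJoinSp (w :: ws) =
      ' ' :: PySem.Chars.join (" ".toList) ((w :: ws).map String.toList) := by
  induction ws generalizing w with
  | nil => simp [pvJoinSp, PySem.Chars.join_singleton]
  | cons w2 r ih =>
    rw [List.map_cons, List.map_cons, PySem.Chars.join_cons_cons]
    have h2 := ih w2
    simp only [pvJoinSp, List.map_cons, List.flatten_cons] at h2 ⊢
    rw [h2]
    have hsp : (" ".toList : List Char) = [' '] := rfl
    rw [hsp]
    simp

lemma pvStrip_joinSp (ws : List String) :
    PySem.Chars.strip (pvJoinSp ws) =
      PySem.Chars.strip (PySem.Chars.join (" ".toList) (ws.map String.toList)) := by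
  cases ws with
  | nil => rfl
  | cons w ws' => rw [pvJoinSp_cons_join, pvStrip_space_cons]

-- merge_tags' / B's final flush, expressed through pvFlush
lemma pvMatch_flush (st : List (Int × Int × String) × Option String × Int × Int) :
    (match st.2.1 with
      | some c => st.1 ++ [(st.2.2.1, st.2.2.2, c)]
      | none => st.1) = pvFlush st.1 (pvMCur st) := by
  rcases st with ⟨m, ct, s, e⟩; cases ct <;> rfl

lemma pvMatch_flush' (spans : List (Int × Int × String)) (cur : Option (Int × Int × String)) :
    (match cur with | some c => spans ++ [c] | none => spans) = pvFlush spans cur := rfl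

-- ===== VERDICT (by name: the statement is the Claim_ definition above) =====
theorem convert_to_spacy_format_spec : Claim_equal_convert_to_spacy_format := by
  intro data _
  unfold Spec_convert_to_spacy_format
  cases data with
  | nil => rfl
  | cons d rest =>
    unfold convert_to_spacy_format convert_to_spacy_format_alt merge_tags
    dsimp only
    have htext := pvAFold_text (d :: rest) []
    rw [List.nil_append] at htext
    have hne : ((d :: rest).foldl pvAStep ([], [])).1 ≠ [] := by
      rw [htext]; simp [pvJoinSp]
    rw [if_pos hne]
    have hmain := pvMain (d :: rest) [] [] [] none 0 0
    have hwords := pvBFold_words (d :: rest) ([], [], none, 0)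
    rw [List.nil_append] at hwords
    rw [pvMatch_flush, pvMatch_flush']
    refine Prod.ext ?_ ?_
    · -- text component
      dsimp only
      rw [hwords, htext]
      conv_rhs => rw [← String.ofList_toList (s := PySem.Str.strip _)]
      rw [PySem.Str.toList_strip, PySem.Str.toList_join, ← pvStrip_joinSp]
    · -- spans component
      dsimp only
      simpa using hmain
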